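-- pv_equiv track=rewrite | github.com/abx13/Hypatia | satgenpy/satgen/dynamic_mcnf_paper_code/interface.py | fstate2sol
-- ===== SOURCE A (Python) =====
-- def fstate2sol(fstate,list_commodities):
-- 	#converts network solution to a solution as computed by Francois's algo
-- 	results_list = [None for _ in list_commodities]
-- 	if fstate is None:#fstate can be initialised with None
-- 		return results_list
-- 	for idcomm,com in enumerate(list_commodities):
-- 		src,dest,_=com
-- 		temp_list=[]
-- 		curr=src
-- 		while curr!=dest and (curr,dest) in fstate and fstate[(curr,dest)]:
-- 			nxt,if_src,if_nxt = fstate[(curr,dest)]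
-- 			temp_list.append(curr)
-- 			curr=nxt
-- 		if curr==dest:
-- 			results_list[idcomm]=temp_list
-- 	return results_list
-- ===== SOURCE B (Python) =====
-- def fstate2sol(fstate, list_commodities):
--     # Memoized reconstruction: walk next-hop pointers like the original, but
--     # stop early at a (node, dest) whose path suffix was already computed for an
--     # earlier commodity, and on success backfill the memo for every node visited.
--     results_list = [None for _ in list_commodities]
--     if fstate is None:
--         return results_list
--     memo = {}
--     for idcomm, com in enumerate(list_commodities):
--         src, dest, _ = com
--         visited = []
--         curr = src
--         path = None
--         while True:
--             if curr == dest: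
--                 path = []
--                 break
--             if (curr, dest) in memo:
--                 path = memo[(curr, dest)]
--                 break
--             if (curr, dest) in fstate and fstate[(curr, dest)]:
--                 visited.append(curr)
--                 curr = fstate[(curr, dest)][0]
--             else:
--                 break
--         if path is not None:
--             results_list[idcomm] = visited + path
--             suffix = path
--             for node in reversed(visited):
--                 suffix = [node] + suffix
--                 memo[(node, dest)] = suffix
--     return results_list
-- ===== Notes on version B (the rewrite author's own statement) =====
-- stated objective: alternative
-- what changed: B threads a memo dict (node,dest) -> path-suffix across commodities: each walk stops early at a memoized node and splices the cached suffix, and successful walks backfill the memo for every visited node, so suffixes shared by commodities with the same destination are walked once instead of once per commodity.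
import Mathlib
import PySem

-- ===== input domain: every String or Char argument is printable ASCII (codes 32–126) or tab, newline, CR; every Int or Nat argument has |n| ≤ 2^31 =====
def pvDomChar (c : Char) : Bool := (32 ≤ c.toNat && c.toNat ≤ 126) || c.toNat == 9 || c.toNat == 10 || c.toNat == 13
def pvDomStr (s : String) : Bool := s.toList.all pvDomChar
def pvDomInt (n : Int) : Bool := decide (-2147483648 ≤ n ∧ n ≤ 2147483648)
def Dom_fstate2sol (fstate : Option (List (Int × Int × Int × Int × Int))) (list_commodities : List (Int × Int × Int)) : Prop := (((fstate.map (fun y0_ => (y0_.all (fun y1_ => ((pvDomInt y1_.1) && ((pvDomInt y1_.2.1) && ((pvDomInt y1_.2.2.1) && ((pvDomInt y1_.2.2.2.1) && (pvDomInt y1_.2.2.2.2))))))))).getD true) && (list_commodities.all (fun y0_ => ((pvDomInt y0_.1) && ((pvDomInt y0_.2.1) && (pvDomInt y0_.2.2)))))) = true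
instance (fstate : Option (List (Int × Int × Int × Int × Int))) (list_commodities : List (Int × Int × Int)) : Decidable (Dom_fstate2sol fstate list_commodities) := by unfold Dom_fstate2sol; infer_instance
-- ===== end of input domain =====

-- B re-implements the per-commodity next-hop walk with a cross-commodity memo of
-- already-computed path suffixes (backfilled only on success); equivalence of the
-- RETURN value is proved on all inputs where A's while-loop terminates (Pre_).

-- ===== PORT A =====

-- dict lookup fstate[(curr,dest)]: first entry whose first two components match;
-- the value triple is a non-empty tuple, hence always truthy in A's loop condition.
def pvLookup (fs : List (Int × Int × Int × Int × Int)) (c d : Int) : Option (Int × Int × Int) :=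
  (fs.find? (fun e => e.1 = c ∧ e.2.1 = d)).map (fun e => e.2.2)

-- A's while-loop; fuel (fs.length+1) is enough whenever the Python loop terminates (Pre_).
def pvWalkA (fs : List (Int × Int × Int × Int × Int)) : Nat → Int → Int → List Int → Option (List Int)
  | 0, _, _, _ => none
  | f + 1, dest, curr, acc =>
    if curr = dest then some acc.reverse
    else match pvLookup fs curr dest with
      | none => none
      | some (nxt, _, _) => pvWalkA fs f dest nxt (curr :: acc)

def fstate2sol (fstate : Option (List (Int × Int × Int × Int × Int))) (list_commodities : List (Int × Int × Int)) : List (Option (List Int)) :=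
  match fstate with
  | none => list_commodities.map (fun _ => none)
  | some fs => list_commodities.map (fun com => pvWalkA fs (fs.length + 1) com.2.1 com.1 [])

-- ===== PORT B =====

-- B's inner loop: stop at dest (suffix []), at a memo hit (cached suffix), or at a
-- missing entry (failure); returns (visited-in-order, suffix) on success.
def pvWalkB (fs : List (Int × Int × Int × Int × Int)) (memo : PySem.Dict (Int × Int) (List Int)) : Nat → Int → Int → List Int → Option (List Int × List Int)
  | 0, _, _, _ => none
  | f + 1, dest, curr, vis =>
    if curr = dest then some (vis.reverse, [])
    else match memo.get? (curr, dest) with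
      | some p => some (vis.reverse, p)
      | none => match pvLookup fs curr dest with
        | none => none
        | some (nxt, _, _) => pvWalkB fs memo f dest nxt (curr :: vis)

-- the backfill loop "for node in reversed(visited): suffix = [node]+suffix; memo[...] = suffix"
def pvBackfill (d : Int) (vis pth : List Int) (memo : PySem.Dict (Int × Int) (List Int)) : PySem.Dict (Int × Int) (List Int) :=
  (vis.reverse.foldl (fun st v => (v :: st.1, st.2.insert (v, d) (v :: st.1))) (pth, memo)).2

def pvStepB (fs : List (Int × Int × Int × Int × Int)) (st : List (Option (List Int)) × PySem.Dict (Int × Int) (List Int)) (com : Int × Int × Int) : List (Option (List Int)) × PySem.Dict (Int × Int) (List Int) :=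
  match pvWalkB fs st.2 (fs.length + 1) com.2.1 com.1 [] with
  | none => (none :: st.1, st.2)
  | some (vr, pth) => (some (vr ++ pth) :: st.1, pvBackfill com.2.1 vr pth st.2)

def fstate2sol_alt (fstate : Option (List (Int × Int × Int × Int × Int))) (list_commodities : List (Int × Int × Int)) : List (Option (List Int)) :=
  match fstate with
  | none => list_commodities.map (fun _ => none)
  | some fs => ((list_commodities.foldl (pvStepB fs) ([], PySem.Dict.empty)).1).reverse

-- ===== PRECONDITION & SPEC =====

-- one step of the next-hop map for destination d (terminal states are fixed points)
def pvStep (fs : List (Int × Int × Int × Int × Int)) (d : Int) (c : Int) : Int :=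
  if c = d then c else match pvLookup fs c d with
    | none => c
    | some (nxt, _, _) => nxt

-- a terminal state of A's while-loop: the destination, or no next-hop entry
def pvTerminal (fs : List (Int × Int × Int × Int × Int)) (d c : Int) : Bool :=
  c = d || (pvLookup fs c d).isNone

-- Pre_ excludes exactly the inputs on which A's while-loop never terminates (a next-hop
-- cycle reachable from some commodity's source; A returns no value there): for each
-- commodity, the fs.length-fold iterate of the next-hop map from src is terminal
-- (a terminating walk never revisits a node, so it is terminal within fs.length steps).
def Pre_fstate2sol (fstate : Option (List (Int × Int × Int × Int × Int))) (list_commodities : List (Int × Int × Int)) : Prop :=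
  (fstate.all (fun fs => list_commodities.all (fun com => pvTerminal fs com.2.1 ((pvStep fs com.2.1)^[fs.length] com.1)))) = true
instance (fstate : Option (List (Int × Int × Int × Int × Int))) (list_commodities : List (Int × Int × Int)) : Decidable (Pre_fstate2sol fstate list_commodities) := by unfold Pre_fstate2sol; infer_instance

def pvWitness_fstate2sol : (Option (List (Int × Int × Int × Int × Int))) × (List (Int × Int × Int)) :=
  (some [(0, 2, 1, 5, 6), (1, 2, 2, 5, 6)], [(0, 2, 3), (1, 2, 0), (4, 2, 1)])

def Spec_fstate2sol (fstate : Option (List (Int × Int × Int × Int × Int))) (list_commodities : List (Int × Int × Int)) (out : List (Option (List Int))) : Prop := out = fstate2sol_alt fstate list_commodities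
instance (fstate : Option (List (Int × Int × Int × Int × Int))) (list_commodities : List (Int × Int × Int)) (out : List (Option (List Int))) : Decidable (Spec_fstate2sol fstate list_commodities out) := by unfold Spec_fstate2sol; infer_instance

-- ===== CLAIM (what is proved, stated in full; the proofs are below) =====
def Claim_equal_fstate2sol : Prop := ∀ (fstate : Option (List (Int × Int × Int × Int × Int))) (list_commodities : List (Int × Int × Int)), Dom_fstate2sol fstate list_commodities → Pre_fstate2sol fstate list_commodities → Spec_fstate2sol fstate list_commodities (fstate2sol fstate list_commodities)

-- ===== LEMMAS AND PROOFS =====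

-- fuel form of the termination condition, used by the induction proofs below
def pvTerm (fs : List (Int × Int × Int × Int × Int)) : Nat → Int → Int → Bool
  | 0, _, _ => false
  | f + 1, dest, curr =>
    if curr = dest then true
    else match pvLookup fs curr dest with
      | none => true
      | some (nxt, _, _) => pvTerm fs f dest nxt

theorem pvStep_of_terminal (fs : List (Int × Int × Int × Int × Int)) (d c : Int) (h : pvTerminal fs d c = true) : pvStep fs d c = c := by
  simp only [pvTerminal, Bool.or_eq_true, decide_eq_true_eq, Option.isNone_iff_eq_none] at h
  rcases h with h | h
  · simp [pvStep, h]
  · simp only [pvStep, h]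
    split_ifs <;> rfl

theorem pvTerm_iff_iterate (fs : List (Int × Int × Int × Int × Int)) (d : Int) : ∀ (k : Nat) (c : Int), pvTerm fs (k + 1) d c = pvTerminal fs d ((pvStep fs d)^[k] c) := by
  intro k
  induction k with
  | zero =>
    intro c
    simp only [Function.iterate_zero, id_eq, pvTerm, pvTerminal]
    by_cases hc : c = d
    · simp [hc]
    · cases pvLookup fs c d with
      | none => simp [hc]
      | some w =>
        obtain ⟨n, i, j⟩ := w
        simp [hc]
  | succ k ih =>
    intro c
    by_cases hterm : pvTerminal fs d c = true
    · have hfix : (pvStep fs d)^[k + 1] c = c := Function.iterate_fixed (pvStep_of_terminal fs d c hterm) (k + 1)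
      rw [hfix, hterm]
      simp only [pvTerminal, Bool.or_eq_true, decide_eq_true_eq, Option.isNone_iff_eq_none] at hterm
      rcases hterm with h | h
      · simp [pvTerm, h]
      · simp only [pvTerm, h]
        split_ifs <;> rfl
    · simp only [pvTerminal, Bool.or_eq_true, decide_eq_true_eq, Option.isNone_iff_eq_none, not_or] at hterm
      obtain ⟨hc, hl⟩ := hterm
      cases hl' : pvLookup fs c d with
      | none => exact absurd rfl (hl' ▸ hl)
      | some w =>
        obtain ⟨n, i, j⟩ := w
        have hstep : pvStep fs d c = n := by simp [pvStep, hc, hl']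
        rw [Function.iterate_succ_apply, hstep, ← ih n]
        simp only [pvTerm, if_neg hc, hl']


-- accumulator-free form of A's walk
def pvWA (fs : List (Int × Int × Int × Int × Int)) : Nat → Int → Int → Option (List Int)
  | 0, _, _ => none
  | f + 1, dest, curr =>
    if curr = dest then some []
    else match pvLookup fs curr dest with
      | none => none
      | some (nxt, _, _) => (pvWA fs f dest nxt).map (curr :: ·)

theorem pvWalkA_eq_pvWA (fs : List (Int × Int × Int × Int × Int)) : ∀ (f : Nat) (d c : Int) (acc : List Int), pvWalkA fs f d c acc = (pvWA fs f d c).map (acc.reverse ++ ·) := by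
  intro f
  induction f with
  | zero => intro d c acc; rfl
  | succ f ih =>
    intro d c acc
    simp only [pvWalkA, pvWA]
    split_ifs with h
    · simp
    · cases hl : pvLookup fs c d with
      | none => simp
      | some v =>
        obtain ⟨n, i, j⟩ := v
        simp only [ih]
        cases pvWA fs f d n <;> simp

-- a terminating walk that succeeds for some fuel succeeds within the terminating fuel
theorem pvTerm_success (fs : List (Int × Int × Int × Int × Int)) : ∀ (f : Nat) (d c : Int), pvTerm fs f d c = true → ∀ (g : Nat) (p : List Int), pvWA fs g d c = some p → pvWA fs f d c = some p := by
  intro f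
  induction f with
  | zero => intro d c h; simp [pvTerm] at h
  | succ f ih =>
    intro d c ht g p hw
    obtain ⟨g', rfl⟩ : ∃ g', g = g' + 1 := by
      cases g with
      | zero => simp [pvWA] at hw
      | succ g' => exact ⟨g', rfl⟩
    by_cases hc : c = d
    · simp only [pvWA, if_pos hc] at hw ⊢
      exact hw
    · cases hl : pvLookup fs c d with
      | none => simp [pvWA, hc, hl] at hw
      | some w =>
        obtain ⟨n, i, j⟩ := w
        simp only [pvTerm, if_neg hc, hl] at ht
        simp only [pvWA, if_neg hc, hl] at hw ⊢
        obtain ⟨q, hq, rfl⟩ := Option.map_eq_some_iff.mp hw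
        rw [ih d n ht g' q hq]
        rfl

-- every suffix split of a successful path is itself a successful walk
theorem pvWA_split (fs : List (Int × Int × Int × Int × Int)) : ∀ (f : Nat) (d c : Int) (p : List Int), pvWA fs f d c = some p → ∀ (pre : List Int) (v : Int) (suf : List Int), p = pre ++ v :: suf → ∃ g : Nat, pvWA fs g d v = some (v :: suf) := by
  intro f
  induction f with
  | zero => intro d c p h; simp [pvWA] at h
  | succ f ih =>
    intro d c p h pre v suf hsplit
    by_cases hc : c = d
    · simp only [pvWA, if_pos hc] at h
      obtain rfl : p = [] := (Option.some_inj.mp h).symm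
      exact absurd hsplit (by simp)
    · cases hl : pvLookup fs c d with
      | none => simp [pvWA, hc, hl] at h
      | some w =>
        obtain ⟨n, i, j⟩ := w
        simp only [pvWA, if_neg hc, hl] at h
        obtain ⟨q, hq, rfl⟩ := Option.map_eq_some_iff.mp h
        cases pre with
        | nil =>
          simp only [List.nil_append, List.cons.injEq] at hsplit
          obtain ⟨rfl, rfl⟩ := hsplit
          refine ⟨f + 1, ?_⟩
          simp only [pvWA, if_neg hc, hl, hq]
          rfl
        | cons a pre' =>
          simp only [List.cons_append, List.cons.injEq] at hsplit
          exact ih d n q hq pre' v suf hsplit.2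

-- the memo invariant: every cached suffix is a successful A-walk
def pvInv (fs : List (Int × Int × Int × Int × Int)) (memo : PySem.Dict (Int × Int) (List Int)) : Prop :=
  ∀ (c d : Int) (p : List Int), memo.get? (c, d) = some p → ∃ f : Nat, pvWA fs f d c = some p

-- the backfill fold in recursive form
def pvBackfillR (d : Int) : List Int → List Int → PySem.Dict (Int × Int) (List Int) → PySem.Dict (Int × Int) (List Int)
  | [], _, memo => memo
  | v :: rest, pth, memo => (pvBackfillR d rest pth memo).insert (v, d) (v :: (rest ++ pth))

theorem pvBackfill_eq_aux (d : Int) : ∀ (vis pth : List Int) (memo : PySem.Dict (Int × Int) (List Int)), vis.reverse.foldl (fun st v => (v :: st.1, st.2.insert (v, d) (v :: st.1))) (pth, memo) = (vis ++ pth, pvBackfillR d vis pth memo) := by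
  intro vis
  induction vis with
  | nil => intro pth memo; rfl
  | cons v rest ih =>
    intro pth memo
    simp only [List.reverse_cons, List.foldl_append, ih, List.foldl_cons, List.foldl_nil, pvBackfillR]
    rfl

theorem pvBackfillR_get? (d : Int) : ∀ (vis pth : List Int) (memo : PySem.Dict (Int × Int) (List Int)) (k : Int × Int) (val : List Int), (pvBackfillR d vis pth memo).get? k = some val → memo.get? k = some val ∨ ∃ l1 l2 : List Int, vis = l1 ++ k.1 :: l2 ∧ k.2 = d ∧ val = k.1 :: (l2 ++ pth) := by
  intro vis
  induction vis with
  | nil => intro pth memo k val h; exact Or.inl h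
  | cons v rest ih =>
    intro pth memo k val h
    simp only [pvBackfillR] at h
    rw [PySem.Dict.get?_insert] at h
    by_cases hk : k = (v, d)
    · rw [if_pos hk] at h
      subst hk
      refine Or.inr ⟨[], rest, by simp, rfl, by simpa using h.symm⟩
    · rw [if_neg hk] at h
      rcases ih pth memo k val h with hmem | ⟨l1, l2, hv, hd, hval⟩
      · exact Or.inl hmem
      · exact Or.inr ⟨v :: l1, l2, by simp [hv], hd, hval⟩

theorem pvInv_backfill (fs : List (Int × Int × Int × Int × Int)) (memo : PySem.Dict (Int × Int) (List Int)) (d : Int) (vis pth : List Int) (F : Nat) (c0 : Int)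
    (hInv : pvInv fs memo) (hsucc : pvWA fs F d c0 = some (vis ++ pth)) :
    pvInv fs (pvBackfillR d vis pth memo) := by
  intro c d' p hget
  rcases pvBackfillR_get? d vis pth memo (c, d') p hget with hmem | ⟨l1, l2, hv, hd, hval⟩
  · exact hInv c d' p hmem
  · obtain ⟨g, hg⟩ := pvWA_split fs F d c0 (vis ++ pth) hsucc l1 c (l2 ++ pth) (by simp [hv])
    exact ⟨g, by rw [show d' = d from hd, hg, hval]⟩

-- main walk correspondence: under the invariant and termination, B's walk agrees with A's
theorem pvWalk_main (fs : List (Int × Int × Int × Int × Int)) (memo : PySem.Dict (Int × Int) (List Int)) (hInv : pvInv fs memo) (d : Int) :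
    ∀ (f : Nat) (c : Int) (vis : List Int), pvTerm fs f d c = true →
      (pvWA fs f d c = none ∧ pvWalkB fs memo f d c vis = none) ∨
      (∃ p vr pth : List Int, pvWA fs f d c = some p ∧ pvWalkB fs memo f d c vis = some (vis.reverse ++ vr, pth) ∧ vr ++ pth = p) := by
  intro f
  induction f with
  | zero => intro c vis ht; simp [pvTerm] at ht
  | succ f ih =>
    intro c vis ht
    simp only [pvTerm] at ht
    by_cases hc : c = d
    · refine Or.inr ⟨[], [], [], ?_, ?_, rfl⟩
      · simp [pvWA, hc]
      · simp [pvWalkB, hc]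
    · rw [if_neg hc] at ht
      cases hm : memo.get? (c, d) with
      | some q =>
        obtain ⟨g, hg⟩ := hInv c d q hm
        have hA : pvWA fs (f + 1) d c = some q := pvTerm_success fs (f + 1) d c (by simp only [pvTerm]; rw [if_neg hc]; exact ht) g q hg
        refine Or.inr ⟨q, [], q, hA, ?_, by simp⟩
        simp only [pvWalkB, if_neg hc, hm]
        simp
      | none =>
        cases hl : pvLookup fs c d with
        | none =>
          refine Or.inl ⟨?_, ?_⟩
          · simp only [pvWA, if_neg hc, hl]
          · simp only [pvWalkB, if_neg hc, hm, hl]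
        | some w =>
          obtain ⟨n, i, j⟩ := w
          rw [hl] at ht
          rcases ih n (c :: vis) ht with ⟨hA, hB⟩ | ⟨p, vr, pth, hA, hB, hvp⟩
          · refine Or.inl ⟨?_, ?_⟩
            · simp only [pvWA, if_neg hc, hl, hA]; rfl
            · simp only [pvWalkB, if_neg hc, hm, hl, hB]
          · refine Or.inr ⟨c :: p, c :: vr, pth, ?_, ?_, by simp [hvp]⟩
            · simp only [pvWA, if_neg hc, hl, hA]; rfl
            · simp only [pvWalkB, if_neg hc, hm, hl, hB]
              simp

-- per-commodity step: B's step produces A's entry and preserves the invariant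
theorem pvStepB_correct (fs : List (Int × Int × Int × Int × Int)) (memo : PySem.Dict (Int × Int) (List Int)) (res : List (Option (List Int))) (com : Int × Int × Int)
    (hInv : pvInv fs memo) (ht : pvTerm fs (fs.length + 1) com.2.1 com.1 = true) :
    (pvStepB fs (res, memo) com).1 = (pvWalkA fs (fs.length + 1) com.2.1 com.1 []) :: res ∧ pvInv fs (pvStepB fs (res, memo) com).2 := by
  rcases pvWalk_main fs memo hInv com.2.1 (fs.length + 1) com.1 [] ht with ⟨hA, hB⟩ | ⟨p, vr, pth, hA, hB, hvp⟩
  · constructor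
    · simp [pvStepB, hB, pvWalkA_eq_pvWA, hA]
    · simp only [pvStepB, hB]
      exact hInv
  · simp only [List.reverse_nil, List.nil_append] at hB
    constructor
    · simp [pvStepB, hB, pvWalkA_eq_pvWA, hA, hvp]
    · simp only [pvStepB, hB]
      unfold pvBackfill
      rw [pvBackfill_eq_aux]
      exact pvInv_backfill fs memo com.2.1 vr pth (fs.length + 1) com.1 hInv (by rw [hvp]; exact hA)

-- the fold over commodities
theorem pvFoldB (fs : List (Int × Int × Int × Int × Int)) : ∀ (lcs : List (Int × Int × Int)) (res : List (Option (List Int))) (memo : PySem.Dict (Int × Int) (List Int)), pvInv fs memo → (∀ com ∈ lcs, pvTerm fs (fs.length + 1) com.2.1 com.1 = true) → ((lcs.foldl (pvStepB fs) (res, memo)).1).reverse = res.reverse ++ lcs.map (fun com => pvWalkA fs (fs.length + 1) com.2.1 com.1 []) := by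
  intro lcs
  induction lcs with
  | nil => intro res memo _ _; simp
  | cons com rest ih =>
    intro res memo hInv ht
    obtain ⟨h1, h2⟩ := pvStepB_correct fs memo res com hInv (ht com (List.mem_cons_self))
    simp only [List.foldl_cons]
    have : pvStepB fs (res, memo) com = ((pvStepB fs (res, memo) com).1, (pvStepB fs (res, memo) com).2) := rfl
    rw [this, ih _ _ h2 (fun c hc => ht c (List.mem_cons_of_mem _ hc)), h1]
    simp

-- ===== VERDICT (by name: the statement is the Claim_ definition above) =====
theorem fstate2sol_spec : Claim_equal_fstate2sol := by
  intro fstate lcs _ hpre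
  unfold Spec_fstate2sol
  cases fstate with
  | none => rfl
  | some fs =>
    simp only [Pre_fstate2sol, Option.all_some, List.all_eq_true] at hpre
    have hpre' : ∀ com ∈ lcs, pvTerm fs (fs.length + 1) com.2.1 com.1 = true := fun com hc => by
      rw [pvTerm_iff_iterate]; exact hpre com hc
    simp only [fstate2sol, fstate2sol_alt]
    rw [pvFoldB fs lcs [] PySem.Dict.empty (fun c d p h => by simp [PySem.Dict.get?_empty] at h) hpre']
    simp
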